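-- pv_equiv track=rewrite | github.com/raveriss/Rubik | rubik.py | parse_mix
-- ===== SOURCE A (Python) =====
-- VALID_MOVES = {f + m for f in ['U','R','F','D','L','B'] for m in ['', "2", "'"]}
--
-- class ParseError(Exception):
--     pass
--
-- def parse_mix(mix_str):
--     if not mix_str:
--         raise ParseError("Empty input mix.")
--     tokens = mix_str.strip().split()
--     for tok in tokens:
--         if tok not in VALID_MOVES:
--             raise ParseError(f"Invalid move token: {tok}")
--     return tokens
-- ===== SOURCE B (Python) =====
-- class ParseError(Exception):
--     pass
--
--
-- def parse_mix(mix_str):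
--     if not mix_str:
--         raise ParseError("Empty input mix.")
--     tokens = []
--     cur = ""
--     for ch in mix_str:
--         if ch.isspace():
--             if cur:
--                 _check(cur)
--                 tokens.append(cur)
--                 cur = ""
--         else:
--             cur += ch
--     if cur:
--         _check(cur)
--         tokens.append(cur)
--     return tokens
--
--
-- def _check(tok):
--     ok = False
--     if len(tok) == 1:
--         ok = tok[0] in "URFDLB"
--     elif len(tok) == 2:
--         ok = tok[0] in "URFDLB" and tok[1] in "2'"
--     if not ok:
--         raise ParseError(f"Invalid move token: {tok}")
-- ===== Notes on version B (the rewrite author's own statement) =====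
-- stated objective: alternative
-- what changed: B drops the precomputed VALID_MOVES table and the separate strip/split/validate passes: it tokenizes the string in a single character-level scan and structurally validates each token (face letter plus optional 2/' modifier) as it is completed.
import Mathlib
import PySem

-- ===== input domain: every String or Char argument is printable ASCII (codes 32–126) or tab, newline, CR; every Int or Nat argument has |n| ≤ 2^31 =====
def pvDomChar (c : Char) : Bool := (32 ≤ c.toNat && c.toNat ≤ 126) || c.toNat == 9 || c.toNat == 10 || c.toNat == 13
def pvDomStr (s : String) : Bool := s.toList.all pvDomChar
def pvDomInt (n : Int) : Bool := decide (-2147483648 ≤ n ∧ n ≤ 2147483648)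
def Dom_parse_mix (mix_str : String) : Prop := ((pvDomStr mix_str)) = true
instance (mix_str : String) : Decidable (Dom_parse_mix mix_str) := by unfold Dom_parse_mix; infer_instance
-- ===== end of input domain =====

-- B replaces A's precomputed VALID_MOVES table and separate strip/split/validate passes by a single
-- character-level scan that tokenizes and structurally validates each token in one pass (objective: alternative).


-- ===== PORT A =====
-- VALID_MOVES = {f + m for f in ['U','R','F','D','L','B'] for m in ['', "2", "'"]}
def VALID_MOVES : PySem.Set String :=
  PySem.Set.ofList ((["U","R","F","D","L","B"].flatMap (fun f => (["", "2", "'"].map (fun m => f ++ m)))))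

-- the 'for tok in tokens: if tok not in VALID_MOVES: raise' loop; false = ParseError raised
def parse_mix_checkA : List String → Bool
  | [] => true
  | tok :: rest => if ¬ (tok ∈ VALID_MOVES) then false else parse_mix_checkA rest

def parse_mix (mix_str : String) : List String :=
  if mix_str = "" then []  -- `if not mix_str: raise ParseError(...)` — raise, excluded by Pre_
  else
    let tokens := PySem.Str.split₀ (PySem.Str.strip mix_str)
    if parse_mix_checkA tokens then tokens else []  -- [] marks the ParseError raise, excluded by Pre_

-- ===== PORT B =====
-- _check's structural test; `tok[0] in "URFDLB"` for a single char is exactly list membership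
def pvValidTok : List Char → Bool
  | [c] => (['U','R','F','D','L','B'] : List Char).contains c
  | [c, m] => (['U','R','F','D','L','B'] : List Char).contains c && (['2', '\''] : List Char).contains m
  | _ => false

-- the `for ch in mix_str` scan of Source B: cur = current token, toks = tokens list; none = ParseError
def parse_mix_goB : List Char → List Char → List String → Option (List String)
  | [], cur, toks =>
    if cur = [] then some toks
    else if pvValidTok cur then some (toks ++ [String.ofList cur]) else none
  | c :: rest, cur, toks =>
    if PySem.Chars.isspace c then
      if cur = [] then parse_mix_goB rest [] toks
      else if pvValidTok cur then parse_mix_goB rest [] (toks ++ [String.ofList cur]) else none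
    else parse_mix_goB rest (cur ++ [c]) toks

def parse_mix_alt (mix_str : String) : List String :=
  if mix_str = "" then []  -- raise ParseError, excluded by Pre_
  else (parse_mix_goB mix_str.toList [] []).getD []  -- none = ParseError raise, excluded by Pre_

-- ===== PRECONDITION & SPEC =====
-- Pre_ excludes exactly the inputs where Python A raises ParseError: the empty string, and any
-- whitespace-split token outside the 18 valid moves.
def Pre_parse_mix (mix_str : String) : Prop :=
  mix_str ≠ "" ∧ ∀ tok ∈ PySem.Str.split₀ (PySem.Str.strip mix_str),
    tok ∈ (["U","U2","U'","R","R2","R'","F","F2","F'","D","D2","D'","L","L2","L'","B","B2","B'"] : List String)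
instance (mix_str : String) : Decidable (Pre_parse_mix mix_str) := by unfold Pre_parse_mix; infer_instance

def pvWitness_parse_mix : String := "U R2  F' B"

def Spec_parse_mix (mix_str : String) (out : List String) : Prop := out = parse_mix_alt mix_str
instance (mix_str : String) (out : List String) : Decidable (Spec_parse_mix mix_str out) := by unfold Spec_parse_mix; infer_instance

-- ===== CLAIM (what is proved, stated in full; the proofs are below) =====
def Claim_equal_parse_mix : Prop := ∀ (mix_str : String), Dom_parse_mix mix_str → Pre_parse_mix mix_str → Spec_parse_mix mix_str (parse_mix mix_str)

-- ===== LEMMAS AND PROOFS =====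

-- split₀.go's accumulator can be factored out
theorem pv_go_acc (cs : List Char) : ∀ (cur : List Char) (acc : List (List Char)),
    PySem.Chars.split₀.go cs cur acc = acc.reverse ++ PySem.Chars.split₀.go cs cur [] := by
  induction cs with
  | nil => intro cur acc; simp [PySem.Chars.split₀.go]; split_ifs <;> simp
  | cons c rest ih =>
    intro cur acc
    simp only [PySem.Chars.split₀.go]
    split_ifs with h1 h2
    · exact ih [] acc
    · rw [ih [] (cur.reverse :: acc), ih [] [cur.reverse]]; simp
    · exact ih (c :: cur) acc

-- dropping leading whitespace does not change split₀
theorem pv_go_lstrip (cs : List Char) :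
    PySem.Chars.split₀.go (List.dropWhile PySem.Chars.isspace cs) [] [] = PySem.Chars.split₀.go cs [] [] := by
  induction cs with
  | nil => rfl
  | cons c rest ih =>
    by_cases h : PySem.Chars.isspace c
    · simpa [h, PySem.Chars.split₀.go] using ih
    · simp [h]

-- a trailing whitespace char does not change split₀
theorem pv_go_append_space (w : Char) (hw : PySem.Chars.isspace w = true) (cs : List Char) :
    ∀ (cur : List Char) (acc : List (List Char)),
    PySem.Chars.split₀.go (cs ++ [w]) cur acc = PySem.Chars.split₀.go cs cur acc := by
  induction cs with
  | nil =>
    intro cur acc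
    simp only [List.nil_append, PySem.Chars.split₀.go, hw, if_true]
    split_ifs <;> simp_all
  | cons c rest ih =>
    intro cur acc
    simp only [List.cons_append, PySem.Chars.split₀.go]
    split_ifs <;> apply ih

-- trailing whitespace does not change split₀
theorem pv_go_append_ws (ws : List Char) (hws : ∀ w ∈ ws, PySem.Chars.isspace w = true) :
    ∀ (cs : List Char), PySem.Chars.split₀.go (cs ++ ws) [] [] = PySem.Chars.split₀.go cs [] [] := by
  induction ws using List.reverseRecOn with
  | nil => simp
  | append_singleton ws' w ih =>
    intro cs
    have h1 : cs ++ (ws' ++ [w]) = (cs ++ ws') ++ [w] := by simp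
    rw [h1, pv_go_append_space w (hws w (by simp)) (cs ++ ws'), ih (fun x hx => hws x (by simp [hx]))]

-- stripping does not change split₀
theorem pv_split₀_strip (cs : List Char) :
    PySem.Chars.split₀ (PySem.Chars.strip cs) = PySem.Chars.split₀ cs := by
  unfold PySem.Chars.split₀ PySem.Chars.strip PySem.Chars.rstrip PySem.Chars.lstrip
  set u := List.dropWhile PySem.Chars.isspace cs with hu
  have hsplit : (List.dropWhile PySem.Chars.isspace u.reverse).reverse ++
      (List.takeWhile PySem.Chars.isspace u.reverse).reverse = u := by
    rw [← List.reverse_append, List.takeWhile_append_dropWhile]; simp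
  have hws : ∀ w ∈ (List.takeWhile PySem.Chars.isspace u.reverse).reverse, PySem.Chars.isspace w = true := by
    intro w hw
    exact List.mem_takeWhile_imp (List.mem_reverse.mp hw)
  calc PySem.Chars.split₀.go (List.dropWhile PySem.Chars.isspace u.reverse).reverse [] []
      = PySem.Chars.split₀.go ((List.dropWhile PySem.Chars.isspace u.reverse).reverse ++
          (List.takeWhile PySem.Chars.isspace u.reverse).reverse) [] [] :=
        (pv_go_append_ws _ hws _).symm
    _ = PySem.Chars.split₀.go u [] [] := by rw [hsplit]
    _ = PySem.Chars.split₀.go cs [] [] := pv_go_lstrip cs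

-- main invariant: when every remaining token is valid, B's scan produces split₀'s tokens
theorem pv_goB_inv (cs : List Char) : ∀ (cur : List Char) (toks : List String),
    (∀ t ∈ PySem.Chars.split₀.go cs cur.reverse [], pvValidTok t = true) →
    parse_mix_goB cs cur toks = some (toks ++ (PySem.Chars.split₀.go cs cur.reverse []).map String.ofList) := by
  induction cs with
  | nil =>
    intro cur toks hval
    by_cases hc : cur = []
    · subst hc; simp [parse_mix_goB, PySem.Chars.split₀.go]
    · have hgo : PySem.Chars.split₀.go [] cur.reverse [] = [cur] := by
        simp [PySem.Chars.split₀.go, List.isEmpty_iff, hc]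
      have hv : pvValidTok cur = true := by
        have := hval cur; rw [hgo] at this; exact this (by simp)
      simp [parse_mix_goB, hc, hv, hgo]
  | cons c rest ih =>
    intro cur toks hval
    by_cases hsp : PySem.Chars.isspace c
    · by_cases hc : cur = []
      · subst hc
        have hgo : PySem.Chars.split₀.go (c :: rest) ([] : List Char).reverse [] =
            PySem.Chars.split₀.go rest ([] : List Char).reverse [] := by
          simp [PySem.Chars.split₀.go, hsp]
        rw [hgo] at hval
        simp only [parse_mix_goB, hsp, if_true]
        rw [ih [] toks hval, hgo]
      · have hgo : PySem.Chars.split₀.go (c :: rest) cur.reverse [] =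
            cur :: PySem.Chars.split₀.go rest ([] : List Char).reverse [] := by
          simp only [PySem.Chars.split₀.go, hsp, if_true, List.isEmpty_iff, List.reverse_eq_nil_iff]
          rw [if_neg hc, pv_go_acc]
          simp
        rw [hgo] at hval
        have hv : pvValidTok cur = true := hval cur (by simp)
        simp only [parse_mix_goB, hsp, if_true, if_neg hc, hv]
        rw [ih [] (toks ++ [String.ofList cur])
          (fun t ht => hval t (List.mem_cons_of_mem _ (by simpa using ht))), hgo]
        simp
    · have hgo : PySem.Chars.split₀.go (c :: rest) cur.reverse [] =
          PySem.Chars.split₀.go rest (cur ++ [c]).reverse [] := by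
        simp [PySem.Chars.split₀.go, hsp]
      rw [hgo] at hval
      simp only [parse_mix_goB]
      rw [if_neg hsp, ih (cur ++ [c]) toks hval, hgo]

-- the comprehension set is the 18-element list
theorem pv_valid_moves_eq (s : String) :
    s ∈ VALID_MOVES ↔ s ∈ (["U","U2","U'","R","R2","R'","F","F2","F'","D","D2","D'","L","L2","L'","B","B2","B'"] : List String) := by
  constructor
  · intro h
    have := (PySem.Set.mem_ofList _ s).mp h
    simpa using this
  · intro h
    exact (PySem.Set.mem_ofList _ s).mpr (by simpa using h)

-- every valid move string passes B's structural test
theorem pv_valid_str_tok (s : String)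
    (h : s ∈ (["U","U2","U'","R","R2","R'","F","F2","F'","D","D2","D'","L","L2","L'","B","B2","B'"] : List String)) :
    pvValidTok s.toList = true := by
  simp only [List.mem_cons, List.not_mem_nil, or_false] at h
  rcases h with rfl|rfl|rfl|rfl|rfl|rfl|rfl|rfl|rfl|rfl|rfl|rfl|rfl|rfl|rfl|rfl|rfl|rfl <;> decide

-- A's loop accepts a token list iff every token is in the 18-element list
theorem pv_checkA_of_all (ts : List String)
    (h : ∀ t ∈ ts, t ∈ (["U","U2","U'","R","R2","R'","F","F2","F'","D","D2","D'","L","L2","L'","B","B2","B'"] : List String)) :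
    parse_mix_checkA ts = true := by
  induction ts with
  | nil => rfl
  | cons t rest ih =>
    have ht : t ∈ VALID_MOVES := (pv_valid_moves_eq t).mpr (h t (by simp))
    simp only [parse_mix_checkA, ht, not_true]
    exact ih (fun x hx => h x (by simp [hx]))

-- ===== VERDICT (by name: the statement is the Claim_ definition above) =====
theorem parse_mix_spec : Claim_equal_parse_mix := by
  intro s _hdom hpre
  obtain ⟨hne, hval⟩ := hpre
  unfold Spec_parse_mix parse_mix parse_mix_alt
  rw [if_neg hne, if_neg hne]
  show (if parse_mix_checkA (PySem.Str.split₀ (PySem.Str.strip s)) = true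
        then PySem.Str.split₀ (PySem.Str.strip s) else []) =
      (parse_mix_goB s.toList [] []).getD []
  have hmapt : (PySem.Str.split₀ (PySem.Str.strip s)).map String.toList = PySem.Chars.split₀ s.toList := by
    rw [PySem.Str.split₀_map_toList, PySem.Str.toList_strip, pv_split₀_strip]
  have htokens : PySem.Str.split₀ (PySem.Str.strip s) = (PySem.Chars.split₀ s.toList).map String.ofList := by
    rw [← hmapt, List.map_map]
    simp [Function.comp_def, String.ofList_toList]
  have hvalchars : ∀ t ∈ PySem.Chars.split₀.go s.toList ([] : List Char) [], pvValidTok t = true := by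
    intro t ht
    have ht' : t ∈ (PySem.Str.split₀ (PySem.Str.strip s)).map String.toList := by
      rw [hmapt]; exact ht
    obtain ⟨tok, htok2, rfl⟩ := List.mem_map.mp ht'
    exact pv_valid_str_tok tok (hval tok htok2)
  have hB := pv_goB_inv s.toList [] [] (by simpa using hvalchars)
  rw [pv_checkA_of_all _ hval, if_pos rfl, hB]
  simp only [Option.getD_some, List.nil_append]
  rw [htokens]
  rfl
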